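-- pv_equiv track=rewrite | github.com/tosin2013/code-index-mcp | src/code_index_mcp/tools/scip/position/calculator.py | _binary_search_line
-- ===== SOURCE A (Python) =====
-- from typing import Optional, Dict, Any, List, Tuple
--
-- def _binary_search_line(line_starts: List[int], byte_offset: int) -> int:
--     """Binary search to find line number for byte offset."""
--     left, right = 0, len(line_starts) - 1
--
--     while left <= right:
--         mid = (left + right) // 2
--
--         if mid == len(line_starts) - 1:
--             # Last line
--             return mid + 1
--         elif line_starts[mid] <= byte_offset < line_starts[mid + 1]:
--             return mid + 1  # Convert to 1-based
--         elif byte_offset < line_starts[mid]: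
--             right = mid - 1
--         else:
--             left = mid + 1
--
--     return len(line_starts)  # Fallback to last line
-- ===== SOURCE B (Python) =====
-- def _binary_search_line(line_starts, byte_offset):
--     """Linear forward scan to find the 1-based line number for a byte offset."""
--     n = len(line_starts)
--     k = 0
--     while n - k >= 2:
--         if line_starts[k] <= byte_offset < line_starts[k + 1]:
--             return k + 1
--         k += 1
--     return n
-- ===== Notes on version B (the rewrite author's own statement) =====
-- stated objective: simpler
-- what changed: Replaces the bracket-maintaining binary search with a single forward scan over adjacent pairs of line starts (first interval containing the offset wins, falling through to len(line_starts)).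
-- outside the precondition, e.g. on _binary_search_line([1, 1, 0, 1], 0): A returns 4, B returns 3
import Mathlib
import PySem

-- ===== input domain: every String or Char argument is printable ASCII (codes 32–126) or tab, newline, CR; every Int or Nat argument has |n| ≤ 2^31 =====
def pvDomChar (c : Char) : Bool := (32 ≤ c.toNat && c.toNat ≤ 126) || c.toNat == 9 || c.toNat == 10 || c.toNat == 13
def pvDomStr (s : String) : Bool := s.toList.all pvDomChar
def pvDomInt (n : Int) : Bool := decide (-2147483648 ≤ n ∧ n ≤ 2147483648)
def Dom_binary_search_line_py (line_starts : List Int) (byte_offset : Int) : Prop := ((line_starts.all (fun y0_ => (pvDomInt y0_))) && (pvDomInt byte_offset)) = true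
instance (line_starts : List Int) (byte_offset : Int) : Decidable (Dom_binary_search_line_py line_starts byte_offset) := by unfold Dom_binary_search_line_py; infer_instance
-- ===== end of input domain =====

-- B replaces A's binary search by a single forward scan over adjacent line starts (objective: simpler).

-- ===== PORT A =====
-- The while-loop of A, recursing on the shrinking bracket [left, right]; the fuel
-- argument only makes the recursion structural (each iteration shrinks the bracket, so
-- length + 1 iterations are never exhausted — the proofs below never use the fuel-0 row
-- while left ≤ right).
-- Indexing uses pyGetD with default 0: from the top-level call the invariant
-- 0 ≤ left ≤ mid ≤ right ≤ len - 1 (and mid ≠ len - 1 whenever mid + 1 is read) keeps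
-- every index in range, so pyGetD here is exactly Python's line_starts[...] (never raises).
def bsearchGo (line_starts : List Int) (byte_offset : Int) : Nat → Int → Int → Int
  | 0, _, _ => (line_starts.length : Int)
  | fuel + 1, left, right =>
    if left ≤ right then
      let mid := PySem.Int.floordiv (left + right) 2
      if mid = (line_starts.length : Int) - 1 then mid + 1
      else if PySem.List.pyGetD line_starts mid 0 ≤ byte_offset ∧
              byte_offset < PySem.List.pyGetD line_starts (mid + 1) 0 then mid + 1
      else if byte_offset < PySem.List.pyGetD line_starts mid 0 then
        bsearchGo line_starts byte_offset fuel left (mid - 1)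
      else
        bsearchGo line_starts byte_offset fuel (mid + 1) right
    else (line_starts.length : Int)

def binary_search_line_py (line_starts : List Int) (byte_offset : Int) : Int :=
  bsearchGo line_starts byte_offset (line_starts.length + 1) 0 ((line_starts.length : Int) - 1)

-- ===== PORT B =====
-- B's while-loop walks the list forward looking at the adjacent pair; k counts the
-- elements already passed, and with fewer than two elements left it returns n (= k or k+1).
def scanB (byte_offset : Int) (k : Nat) : List Int → Int
  | [] => (k : Int)
  | [_] => (k : Int) + 1
  | a :: b :: rest =>
    if a ≤ byte_offset ∧ byte_offset < b then (k : Int) + 1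
    else scanB byte_offset (k + 1) (b :: rest)

def binary_search_line_py_alt (line_starts : List Int) (byte_offset : Int) : Int :=
  scanB byte_offset 0 line_starts

-- ===== PRECONDITION & SPEC =====
-- Pre_ admits every non-decreasing line_starts — the documented shape of a line-start
-- table — and additionally every list of at most 3 elements (there the two programs agree
-- regardless of order); excluded are only longer unsorted lists (on which A still returns
-- an int), where A's result depends on the accidental probe path of the binary search.
def Pre_binary_search_line_py (line_starts : List Int) (byte_offset : Int) : Prop :=
  List.Pairwise (· ≤ ·) line_starts ∨ line_starts.length ≤ 3
instance (line_starts : List Int) (byte_offset : Int) : Decidable (Pre_binary_search_line_py line_starts byte_offset) := by unfold Pre_binary_search_line_py; infer_instance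

def pvWitness_binary_search_line_py : List Int × Int := ([0, 5, 9], 6)

def Spec_binary_search_line_py (line_starts : List Int) (byte_offset : Int) (out : Int) : Prop := out = binary_search_line_py_alt line_starts byte_offset
instance (line_starts : List Int) (byte_offset : Int) (out : Int) : Decidable (Spec_binary_search_line_py line_starts byte_offset out) := by unfold Spec_binary_search_line_py; infer_instance

-- ===== CLAIM (what is proved, stated in full; the proofs are below) =====
def Claim_equal_binary_search_line_py : Prop := ∀ (line_starts : List Int) (byte_offset : Int), Dom_binary_search_line_py line_starts byte_offset → Pre_binary_search_line_py line_starts byte_offset → Spec_binary_search_line_py line_starts byte_offset (binary_search_line_py line_starts byte_offset)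

-- ===== LEMMAS AND PROOFS =====

-- The common value both programs compute on a sorted list: the count of line starts ≤ offset
-- when the offset lies strictly between the first and the last start, the length otherwise.
def specVal (ls : List Int) (off : Int) : Int :=
  if h : ls = [] then 0
  else if ls.getLast h ≤ off ∨ off < ls.head h then (ls.length : Int)
  else (ls.countP (fun x => decide (x ≤ off)) : Int)

theorem specVal_of_last_le (ls : List Int) (off : Int) (h : ls ≠ []) (hle : ls.getLast h ≤ off) :
    specVal ls off = (ls.length : Int) := by
  rw [specVal, dif_neg h, if_pos (Or.inl hle)]

theorem specVal_of_lt_head (ls : List Int) (off : Int) (h : ls ≠ []) (hlt : off < ls.head h) :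
    specVal ls off = (ls.length : Int) := by
  rw [specVal, dif_neg h, if_pos (Or.inr hlt)]

theorem specVal_count (ls : List Int) (off : Int) (h : ls ≠ [])
    (hh : ls.head h ≤ off) (hl : off < ls.getLast h) :
    specVal ls off = (ls.countP (fun x => decide (x ≤ off)) : Int) := by
  rw [specVal, dif_neg h, if_neg (by omega)]

theorem specVal_single (a off : Int) : specVal [a] off = 1 := by
  rw [specVal, dif_neg (by simp)]
  have h1 : ([a] : List Int).getLast (by simp) = a := rfl
  have h2 : ([a] : List Int).head (by simp) = a := rfl
  rw [h1, h2]
  split_ifs with hcond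
  · simp
  · exfalso; omega

theorem sorted_getElem_le (ls : List Int) (hs : List.Pairwise (· ≤ ·) ls)
    (i j : Nat) (hij : i ≤ j) (hj : j < ls.length) :
    ls[i]'(lt_of_le_of_lt hij hj) ≤ ls[j] := by
  rcases lt_or_eq_of_le hij with h | h
  · exact List.pairwise_iff_getElem.mp hs i j (lt_of_le_of_lt hij hj) hj h
  · subst h; exact le_refl _

theorem countP_le_eq (off : Int) :
    ∀ (ls : List Int) (k : Nat), k ≤ ls.length →
    (∀ i (h : i < ls.length), (ls[i] ≤ off ↔ i < k)) →
    ls.countP (fun x => decide (x ≤ off)) = k := by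
  intro ls
  induction ls with
  | nil => intro k hk _; simp_all
  | cons a tl ih =>
    intro k hk h
    cases k with
    | zero =>
      have ha : ¬ a ≤ off := by simpa using (h 0 (by simp))
      have htl : tl.countP (fun x => decide (x ≤ off)) = 0 := by
        apply ih 0 (by omega)
        intro i hi
        simpa using h (i + 1) (by simpa using Nat.succ_lt_succ hi)
      simp [htl, ha]
    | succ k' =>
      have ha : a ≤ off := by
        have := (h 0 (by simp)).mpr (by omega)
        simpa using this
      have htl : tl.countP (fun x => decide (x ≤ off)) = k' := by
        apply ih k' (by simpa using hk)
        intro i hi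
        simpa using h (i + 1) (by simpa using Nat.succ_lt_succ hi)
      simp [htl, ha]

theorem scanB_shift (off : Int) :
    ∀ (ls : List Int) (k : Nat), scanB off (k + 1) ls = scanB off k ls + 1 := by
  intro ls
  induction ls with
  | nil => intro k; simp [scanB]
  | cons a tl ih =>
    intro k
    cases tl with
    | nil => simp [scanB]
    | cons b rest =>
      by_cases hc : a ≤ off ∧ off < b
      · simp [scanB, hc]
      · simp only [scanB, if_neg hc]
        exact ih (k + 1)

theorem scanB_eq_specVal (off : Int) :
    ∀ (ls : List Int), List.Pairwise (· ≤ ·) ls → scanB off 0 ls = specVal ls off := by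
  intro ls
  induction ls with
  | nil => intro _; simp [scanB, specVal]
  | cons a tl ih =>
    intro hs
    cases tl with
    | nil => simp only [scanB, specVal_single]; norm_num
    | cons b rest =>
      have hab : a ≤ b := (List.pairwise_cons.mp hs).1 b (by simp)
      have htl : List.Pairwise (· ≤ ·) (b :: rest) := (List.pairwise_cons.mp hs).2
      have hbl : b ≤ (b :: rest).getLast (by simp) := by
        have hmem := List.getLast_mem (l := b :: rest) (by simp)
        rcases List.mem_cons.mp hmem with h | h
        · omega
        · exact (List.pairwise_cons.mp htl).1 _ h
      have hlast : (a :: b :: rest).getLast (by simp) = (b :: rest).getLast (by simp) :=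
        List.getLast_cons (by simp)
      by_cases hc : a ≤ off ∧ off < b
      · -- first interval hit: both sides are 1
        have h1 : scanB off 0 (a :: b :: rest) = 1 := by simp [scanB, hc]
        have hcount : (a :: b :: rest).countP (fun x => decide (x ≤ off)) = 1 := by
          apply countP_le_eq off _ 1 (by simp)
          intro i hi
          cases i with
          | zero => simpa using hc.1
          | succ i' =>
            have hb : b ≤ (a :: b :: rest)[i' + 1] :=
              sorted_getElem_le _ hs 1 (i' + 1) (by omega) hi
            constructor
            · intro hle; omega
            · intro hcontra; omega
        rw [h1, specVal_count _ _ (by simp) (by simpa using hc.1)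
              (by rw [hlast]; omega), hcount]
        norm_num
      · have h2 : scanB off 0 (a :: b :: rest) = scanB off 0 (b :: rest) + 1 := by
          simp only [scanB, if_neg hc]
          exact scanB_shift off (b :: rest) 0
        rw [h2, ih htl]
        by_cases hao : off < a
        · have hob : off < b := by omega
          rw [specVal_of_lt_head (b :: rest) off (by simp) (by simpa using hob),
              specVal_of_lt_head (a :: b :: rest) off (by simp) (by simpa using hao)]
          simp only [List.length_cons]
          push_cast
          ring
        · have ha : a ≤ off := by omega
          have hbo : b ≤ off := by
            rcases not_and_or.mp hc with h | h
            · omega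
            · omega
          by_cases hL : (b :: rest).getLast (by simp) ≤ off
          · rw [specVal_of_last_le (b :: rest) off (by simp) hL,
                specVal_of_last_le (a :: b :: rest) off (by simp) (by rw [hlast]; exact hL)]
            simp only [List.length_cons]
            push_cast
            ring
          · rw [specVal_count (b :: rest) off (by simp) (by simpa using hbo) (by omega),
                specVal_count (a :: b :: rest) off (by simp) (by simpa using ha)
                  (by rw [hlast]; omega)]
            simp [List.countP_cons, ha]

-- When the while-loop exits (left = right + 1), the fallback len(line_starts) is
-- also what specVal gives: the invariants force off < line_starts[0] there.
theorem bsearch_exit (ls : List Int) (off : Int) (hn : 1 ≤ ls.length)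
    (right : Int) (h0 : 0 ≤ right + 1) (hl : right + 1 ≤ (ls.length : Int) - 1)
    (hA : right + 1 = 0 ∨ PySem.List.pyGetD ls (right + 1) 0 ≤ off)
    (hB : right = (ls.length : Int) - 1 ∨ off < PySem.List.pyGetD ls (right + 1) 0) :
    ((ls.length : Int)) = specVal ls off := by
  have hne : ls ≠ [] := List.ne_nil_of_length_pos (by omega)
  rcases hB with hB | hB
  · exfalso; omega
  · rcases hA with hA | hA
    · have h0' : off < ls.head hne := by
        rw [List.head_eq_getElem]
        have hg := PySem.List.pyGetD_eq_getElem ls (i := right + 1) 0 h0 (by omega)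
        rw [hg] at hB
        have ht : (right + 1).toNat = 0 := by omega
        simpa [ht] using hB
      rw [specVal_of_lt_head ls off hne h0']
    · exfalso; omega

theorem bsearchGo_eq (ls : List Int) (off : Int) (hs : List.Pairwise (· ≤ ·) ls)
    (hn : 1 ≤ ls.length) :
    ∀ (n : Nat) (left right : Int), (right + 1 - left).toNat ≤ n →
    0 ≤ left → left ≤ (ls.length : Int) - 1 → right ≤ (ls.length : Int) - 1 →
    left ≤ right + 1 →
    (left = 0 ∨ PySem.List.pyGetD ls left 0 ≤ off) →
    (right = (ls.length : Int) - 1 ∨ off < PySem.List.pyGetD ls (right + 1) 0) →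
    bsearchGo ls off n left right = specVal ls off := by
  intro n
  induction n with
  | zero =>
    intro left right hm h0 hl hr hlr hA hB
    have hleft : left = right + 1 := by omega
    subst hleft
    exact bsearch_exit ls off hn right h0 hl hA hB
  | succ n ih =>
    intro left right hm h0 hl hr hlr hA hB
    rw [show bsearchGo ls off (n + 1) left right =
          (if left ≤ right then
            let mid := PySem.Int.floordiv (left + right) 2
            if mid = (ls.length : Int) - 1 then mid + 1
            else if PySem.List.pyGetD ls mid 0 ≤ off ∧
                    off < PySem.List.pyGetD ls (mid + 1) 0 then mid + 1
            else if off < PySem.List.pyGetD ls mid 0 then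
              bsearchGo ls off n left (mid - 1)
            else
              bsearchGo ls off n (mid + 1) right
          else (ls.length : Int)) from rfl]
    by_cases hC : left ≤ right
    · rw [if_pos hC]
      simp only []
      have hmb := PySem.Int.floordiv_two_mid_bounds (lo := left) (hi := right) hC
      set mid := PySem.Int.floordiv (left + right) 2 with hmiddef
      have hbr : mid * 2 ≤ left + right ∧ left + right < (mid + 1) * 2 :=
        (PySem.Int.floordiv_eq_iff_of_pos (by omega)).mp hmiddef.symm
      have hne : ls ≠ [] := List.ne_nil_of_length_pos (by omega)
      by_cases h1 : mid = (ls.length : Int) - 1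
      · rw [if_pos h1]
        have hright : right = (ls.length : Int) - 1 := by omega
        have hleft : left = (ls.length : Int) - 1 := by omega
        rcases hA with hA | hA
        · have hone : ls.length = 1 := by omega
          obtain ⟨a, rfl⟩ := List.length_eq_one_iff.mp hone
          rw [specVal_single]
          omega
        · have hlastle : ls.getLast hne ≤ off := by
            rw [List.getLast_eq_getElem]
            have hg := PySem.List.pyGetD_eq_getElem ls (i := left) 0 h0 (by omega)
            rw [hg] at hA
            have ht : left.toNat = ls.length - 1 := by omega
            simp only [ht] at hA
            exact hA
          rw [specVal_of_last_le ls off hne hlastle]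
          omega
      · rw [if_neg h1]
        have hgm := PySem.List.pyGetD_eq_getElem ls (i := mid) 0 (by omega) (by omega)
        have hgm1 := PySem.List.pyGetD_eq_getElem ls (i := mid + 1) 0 (by omega) (by omega)
        have hmt : (mid + 1).toNat = mid.toNat + 1 := by omega
        by_cases h2 : PySem.List.pyGetD ls mid 0 ≤ off ∧
            off < PySem.List.pyGetD ls (mid + 1) 0
        · rw [if_pos h2]
          obtain ⟨h2a, h2b⟩ := h2
          rw [hgm] at h2a
          rw [hgm1] at h2b
          simp only [hmt] at h2b
          have hhead : ls.head hne ≤ off := by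
            rw [List.head_eq_getElem]
            exact le_trans (sorted_getElem_le ls hs 0 mid.toNat (by omega) (by omega)) h2a
          have hlastgt : off < ls.getLast hne := by
            rw [List.getLast_eq_getElem]
            exact lt_of_lt_of_le h2b
              (sorted_getElem_le ls hs (mid.toNat + 1) (ls.length - 1) (by omega) (by omega))
          rw [specVal_count ls off hne hhead hlastgt]
          have hcnt : ls.countP (fun x => decide (x ≤ off)) = mid.toNat + 1 := by
            apply countP_le_eq off ls (mid.toNat + 1) (by omega)
            intro i hi
            constructor
            · intro hle
              by_contra hcon
              have hmono := sorted_getElem_le ls hs (mid.toNat + 1) i (by omega) hi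
              omega
            · intro hlt
              exact le_trans (sorted_getElem_le ls hs i mid.toNat (by omega) (by omega)) h2a
          rw [hcnt]
          push_cast
          omega
        · rw [if_neg h2]
          by_cases h3 : off < PySem.List.pyGetD ls mid 0
          · rw [if_pos h3]
            apply ih left (mid - 1) (by omega) h0 hl (by omega) (by omega) hA
            right
            have hmm : mid - 1 + 1 = mid := by omega
            rw [hmm]
            exact h3
          · rw [if_neg h3]
            apply ih (mid + 1) right (by omega) (by omega) (by omega) hr (by omega) _ hB
            right
            have hmle : PySem.List.pyGetD ls mid 0 ≤ off := by omega
            rcases not_and_or.mp h2 with h | h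
            · exact absurd hmle h
            · omega
    · rw [if_neg hC]
      have hleft : left = right + 1 := by omega
      subst hleft
      exact bsearch_exit ls off hn right h0 hl hA hB

-- On lists of at most 3 elements the two programs agree even without sortedness:
-- both computations unfold to finitely many comparisons.
theorem short_eq (ls : List Int) (off : Int) (h : ls.length ≤ 3) :
    binary_search_line_py ls off = binary_search_line_py_alt ls off := by
  rcases ls with _ | ⟨a, _ | ⟨b, _ | ⟨c, _ | ⟨d, tl⟩⟩⟩⟩
  · rfl
  · simp [binary_search_line_py, binary_search_line_py_alt, bsearchGo, scanB]
  · simp [binary_search_line_py, binary_search_line_py_alt, bsearchGo, scanB, pysem,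
      PySem.Int.floordiv,
      show Int.fdiv 1 2 = 0 from by decide, show Int.toNat 1 = 1 from rfl]
  · simp [binary_search_line_py, binary_search_line_py_alt, bsearchGo, scanB, pysem,
      PySem.Int.floordiv,
      show Int.fdiv 0 2 = 0 from by decide,
      show Int.toNat 2 = 2 from rfl, show Int.toNat 1 = 1 from rfl]
    split_ifs <;> omega
  · simp at h; omega

theorem binary_search_line_py_spec_aux (ls : List Int) (off : Int)
    (hs : List.Pairwise (· ≤ ·) ls) :
    binary_search_line_py ls off = binary_search_line_py_alt ls off := by
  cases ls with
  | nil => rfl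
  | cons a tl =>
    have hlen : 1 ≤ (a :: tl).length := by simp
    rw [binary_search_line_py,
        bsearchGo_eq (a :: tl) off hs hlen
          ((a :: tl).length + 1)
          0 (((a :: tl).length : Int) - 1) (by omega) (by omega) (by omega) (by omega)
          (by omega) (Or.inl rfl) (Or.inl rfl),
        binary_search_line_py_alt, scanB_eq_specVal off _ hs]

-- ===== VERDICT (by name: the statement is the Claim_ definition above) =====
theorem binary_search_line_py_spec : Claim_equal_binary_search_line_py := by
  intro ls off _ hpre
  unfold Spec_binary_search_line_py
  rcases hpre with hs | hshort
  · exact binary_search_line_py_spec_aux ls off hs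
  · exact short_eq ls off hshort
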